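-- pv_equiv track=rewrite | github.com/jang1563/manuscript-writing-harness | scripts/references_common.py | _extract_braced_body
-- ===== SOURCE A (Python) =====
-- def _extract_braced_body(text: str, start: int) -> str | None:
--     """Extract text up to the matching closing brace, handling nesting."""
--     depth = 1
--     i = start
--     while i < len(text) and depth > 0:
--         if text[i] == "{":
--             depth += 1
--         elif text[i] == "}":
--             depth -= 1
--         i += 1
--     if depth != 0:
--         return None
--     return text[start : i - 1]
-- ===== SOURCE B (Python) =====
-- def _extract_braced_body(text: str, start: int) -> str | None:
--     """Extract text up to the matching closing brace, jumping between brace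
--     positions with str.find instead of stepping per character."""
--     depth = 1
--     i = start
--     while True:
--         c = text.find("}", i)
--         if c == -1:
--             return None
--         o = text.find("{", i)
--         if o != -1 and o < c:
--             depth += 1
--             i = o + 1
--         else:
--             depth -= 1
--             if depth == 0:
--                 return text[start:c]
--             i = c + 1
-- ===== Notes on version B (the rewrite author's own statement) =====
-- stated objective: faster
-- what changed: Replaces the per-character while-loop with a scan that jumps directly between brace positions using str.find, updating the depth counter only at '{'/'}' occurrences.
-- outside the precondition, e.g. on _extract_braced_body('}x', -1): A returns '', B returns None
import Mathlib
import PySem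

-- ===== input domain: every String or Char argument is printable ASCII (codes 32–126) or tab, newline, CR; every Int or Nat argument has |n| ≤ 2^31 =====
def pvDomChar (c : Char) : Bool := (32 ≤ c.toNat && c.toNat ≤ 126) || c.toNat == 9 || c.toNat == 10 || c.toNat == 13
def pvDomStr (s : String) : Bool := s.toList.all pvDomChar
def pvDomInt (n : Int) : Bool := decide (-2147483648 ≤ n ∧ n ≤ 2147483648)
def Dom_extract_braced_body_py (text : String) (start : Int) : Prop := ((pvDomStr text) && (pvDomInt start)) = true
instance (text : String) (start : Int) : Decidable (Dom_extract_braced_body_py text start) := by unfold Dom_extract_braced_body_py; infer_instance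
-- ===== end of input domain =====

-- B replaces A's per-character while-loop by a scan that jumps between brace positions
-- with str.find; equivalence is claimed for 0 ≤ start (Pre_ below).
-- A mutates nothing; the claims are about the return value only.

-- ===== PORT A =====
-- A's while loop: step through the characters one by one, tracking the depth; returns
-- the final (i, depth) pair of the loop. The fuel only makes the loop total: it is
-- (len(text) - i) at the call site, and i increases by 1 while i < len(text), so the
-- fuel never runs out before the loop guard fails.
def extractAScan (cs : List Char) (fuel : Nat) (i : Int) (depth : Int) : Int × Int :=
  match fuel with
  | 0 => (i, depth)
  | fuel + 1 =>
    if i < (cs.length : Int) ∧ 0 < depth then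
      -- text[i]; under Pre_ (0 ≤ start) the index is always in range
      let ch := PySem.List.pyGetD cs i ' '
      if ch = '{' then extractAScan cs fuel (i + 1) (depth + 1)
      else if ch = '}' then extractAScan cs fuel (i + 1) (depth - 1)
      else extractAScan cs fuel (i + 1) depth
    else (i, depth)

def extract_braced_body_py (text : String) (start : Int) : Option String :=
  let r := extractAScan text.toList ((text.toList.length : Int) - start).toNat start 1
  if r.2 ≠ 0 then none
  else some (PySem.Str.slice text (some start) (some (r.1 - 1)))

-- ===== PORT B =====
-- B's while loop: jump to the next '}' (c) and next '{' (o); returns the index of the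
-- matching '}' (some c) or none. The fuel only makes the loop total: it is
-- len(text) + 1 at the call site, and each iteration moves i past a brace position
-- strictly inside the string, so the fuel never runs out before a return.
def extractBLoop (cs : List Char) (fuel : Nat) (i : Int) (depth : Int) : Option Int :=
  match fuel with
  | 0 => none
  | fuel + 1 =>
    let c := PySem.Chars.findFrom cs ['}'] i none
    if c = -1 then none
    else
      let o := PySem.Chars.findFrom cs ['{'] i none
      if o ≠ -1 ∧ o < c then extractBLoop cs fuel (o + 1) (depth + 1)
      else if depth - 1 = 0 then some c
      else extractBLoop cs fuel (c + 1) (depth - 1)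

def extract_braced_body_py_alt (text : String) (start : Int) : Option String :=
  match extractBLoop text.toList (text.toList.length + 1) start 1 with
  | none => none
  | some c => some (PySem.Str.slice text (some start) (some c))

-- ===== PRECONDITION & SPEC =====
-- Pre_ excludes negative start, where A's per-character loop indexes the string with
-- negative Python indices (wrapping around to the end and then rescanning from the
-- front) — an accident of indexing no caller relies on; for start < -len(text) A even
-- raises IndexError, while B's str.find clamps the bound and returns normally.
def Pre_extract_braced_body_py (text : String) (start : Int) : Prop := 0 ≤ start
instance (text : String) (start : Int) : Decidable (Pre_extract_braced_body_py text start) := by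
  unfold Pre_extract_braced_body_py; infer_instance

def pvWitness_extract_braced_body_py : String × Int := ("a{b}c}d", 0)

def Spec_extract_braced_body_py (text : String) (start : Int) (out : Option String) : Prop := out = extract_braced_body_py_alt text start
instance (text : String) (start : Int) (out : Option String) : Decidable (Spec_extract_braced_body_py text start out) := by unfold Spec_extract_braced_body_py; infer_instance

-- ===== CLAIM (what is proved, stated in full; the proofs are below) =====
def Claim_equal_extract_braced_body_py : Prop := ∀ (text : String) (start : Int), Dom_extract_braced_body_py text start → Pre_extract_braced_body_py text start → Spec_extract_braced_body_py text start (extract_braced_body_py text start)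

-- ===== LEMMAS AND PROOFS =====

-- normal form of Python's s.find(sub, i) with no end bound
theorem findFromNF (s : List Char) (sub : List Char) (i : Int) :
    PySem.Chars.findFrom s sub i none =
    (let st := if i < 0 then (if i + (s.length:Int) < 0 then 0 else i + s.length) else i
     if (s.length:Int) < st then -1
     else if PySem.Chars.find (List.drop st.toNat s) sub = -1 then -1
     else st + PySem.Chars.find (List.drop st.toNat s) sub) := by
  unfold PySem.Chars.findFrom
  simp only [Int.toNat_natCast, List.take_length]

-- a successful find lands at or after the start bound and strictly inside the string
theorem extractFindBounds (s : List Char) (ch : Char) (i : Int)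
    (h : PySem.Chars.findFrom s [ch] i none ≠ -1) :
    i ≤ PySem.Chars.findFrom s [ch] i none ∧ PySem.Chars.findFrom s [ch] i none < s.length := by
  rw [findFromNF] at h ⊢
  set st := if i < 0 then (if i + (s.length:Int) < 0 then 0 else i + s.length) else i with hst
  have hsti : i ≤ st ∧ 0 ≤ st := by rw [hst]; split_ifs <;> omega
  simp only at h ⊢
  split_ifs at h ⊢ with h1 h2
  · exact absurd rfl h
  · exact absurd rfl h
  · set r := PySem.Chars.find (List.drop st.toNat s) [ch] with hr
    have hr0 : 0 ≤ r := by
      have := PySem.Chars.neg_one_le_find (List.drop st.toNat s) [ch]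
      omega
    have hspec := (PySem.Chars.find_spec hr0).1
    have hlen1 : 1 ≤ ((List.drop st.toNat s).drop r.toNat).length := hspec.length_le
    have hlen2 : ((List.drop st.toNat s).drop r.toNat).length = s.length - st.toNat - r.toNat := by
      simp; omega
    have : st.toNat = st := Int.toNat_of_nonneg hsti.2
    omega

theorem singlePrefixIff (ch : Char) (l : List Char) : [ch] <+: l ↔ l[0]? = some ch := by
  cases l <;> simp [List.cons_prefix_cons, eq_comm]

-- find returned -1: no occurrence at or after i
theorem extractFindNone (s : List Char) (ch : Char) (i : Int) (hi : 0 ≤ i)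
    (h : PySem.Chars.findFrom s [ch] i none = -1) :
    ∀ j : Nat, i ≤ (j : Int) → s[j]? ≠ some ch := by
  rw [findFromNF] at h
  simp only [if_neg (by omega : ¬ i < 0)] at h
  intro j hij hj
  split_ifs at h with h1 h2
  · rw [List.getElem?_eq_none (by omega : s.length ≤ j)] at hj
    simp at hj
  · rw [PySem.Chars.find_eq_neg_one_iff] at h2
    apply h2
    have hpre : [ch] <+: List.drop (j - i.toNat) (List.drop i.toNat s) := by
      rw [singlePrefixIff, List.getElem?_drop, List.getElem?_drop,
        (by omega : i.toNat + (j - i.toNat + 0) = j)]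
      exact hj
    exact hpre.isInfix.trans (List.drop_suffix _ _).isInfix
  · have := PySem.Chars.neg_one_le_find (List.drop i.toNat s) [ch]
    omega

-- find returned an index: the first occurrence at or after i
theorem extractFindSome (s : List Char) (ch : Char) (i : Int) (hi : 0 ≤ i)
    (h : PySem.Chars.findFrom s [ch] i none ≠ -1) :
    ∃ p : Nat, PySem.Chars.findFrom s [ch] i none = (p : Int) ∧ i ≤ (p : Int) ∧ p < s.length ∧
      s[p]? = some ch ∧ ∀ j : Nat, i ≤ (j : Int) → j < p → s[j]? ≠ some ch := by
  have hb := extractFindBounds s ch i h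
  rw [findFromNF] at h hb ⊢
  simp only [if_neg (by omega : ¬ i < 0)] at h hb ⊢
  split_ifs at h hb ⊢ with h1 h2
  · exact absurd rfl h
  · exact absurd rfl h
  · set r := PySem.Chars.find (List.drop i.toNat s) [ch] with hr
    have hr0 : 0 ≤ r := by
      have := PySem.Chars.neg_one_le_find (List.drop i.toNat s) [ch]
      omega
    have hspec := PySem.Chars.find_spec (s := List.drop i.toNat s) (sub := [ch]) hr0
    refine ⟨i.toNat + r.toNat, by omega, by omega, by omega, ?_, ?_⟩
    · have h0 := (singlePrefixIff ch _).1 hspec.1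
      rw [List.getElem?_drop, List.getElem?_drop] at h0
      rw [(by omega : i.toNat + r.toNat = i.toNat + (r.toNat + 0))]
      exact h0
    · intro j hij hjp hjc
      have hm : j - i.toNat < r.toNat := by omega
      apply hspec.2 (j - i.toNat) hm
      rw [singlePrefixIff, List.getElem?_drop, List.getElem?_drop,
        (by omega : i.toNat + (j - i.toNat + 0) = j)]
      exact hjc

-- A's loop result does not depend on the fuel once the fuel is sufficient
theorem extractAScanFuel (cs : List Char) :
    ∀ (f1 f2 : Nat) (i depth : Int), ((cs.length : Int) - i).toNat ≤ f1 →
    ((cs.length : Int) - i).toNat ≤ f2 →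
    extractAScan cs f1 i depth = extractAScan cs f2 i depth := by
  intro f1
  induction f1 with
  | zero =>
      intro f2 i depth h1 h2
      cases f2 with
      | zero => rfl
      | succ f2 =>
          rw [extractAScan, extractAScan, if_neg (by omega)]
  | succ f1 ih =>
      intro f2 i depth h1 h2
      cases f2 with
      | zero => rw [extractAScan, extractAScan, if_neg (by omega)]
      | succ f2 =>
          rw [extractAScan]
          conv_rhs => rw [extractAScan]
          split_ifs with hg
          · have h1' : ((cs.length : Int) - (i + 1)).toNat ≤ f1 := by omega
            have h2' : ((cs.length : Int) - (i + 1)).toNat ≤ f2 := by omega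
            dsimp only
            split_ifs <;> exact ih f2 (i + 1) _ h1' h2'
          · rfl

-- one step of A's loop at an in-range position
theorem extractAScanStep (cs : List Char) (f : Nat) (i depth : Int) (ch : Char) (hi : 0 ≤ i)
    (hc : cs[i.toNat]? = some ch) (hd : 0 < depth)
    (hf : ((cs.length : Int) - i).toNat ≤ f) :
    extractAScan cs f i depth =
      extractAScan cs f (i + 1)
        (if ch = '{' then depth + 1 else if ch = '}' then depth - 1 else depth) := by
  have hlt : i.toNat < cs.length := by
    rcases List.getElem?_eq_some_iff.1 hc with ⟨h', _⟩; exact h'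
  obtain ⟨f', rfl⟩ : ∃ f', f = f' + 1 := ⟨f - 1, by omega⟩
  have hget : PySem.List.pyGetD cs i ' ' = ch := by
    rw [PySem.List.pyGetD_eq_getElem (h0 := hi)
      (h1 := by exact_mod_cast (by omega : i < (cs.length : Int)))]
    exact (List.getElem?_eq_some_iff.1 hc).2
  rw [extractAScan, if_pos ⟨(by omega : i < (cs.length : Int)), hd⟩]
  simp only [hget]
  have hsuff : ((cs.length : Int) - (i + 1)).toNat ≤ f' := by omega
  split_ifs <;>
    exact extractAScanFuel cs f' (f' + 1) (i + 1) _ hsuff (by omega)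

theorem extractAScanZero (cs : List Char) (f : Nat) (i : Int) :
    extractAScan cs f i 0 = (i, 0) := by
  cases f with
  | zero => rfl
  | succ f => rw [extractAScan, if_neg (by omega)]

-- A's loop skips a brace-free stretch without changing the depth
theorem extractAScanSkip (cs : List Char) (f : Nat) (depth : Int) (hd : 0 < depth) :
    ∀ (n : Nat) (i m : Int), 0 ≤ i → i ≤ m → m ≤ (cs.length : Int) → (m - i).toNat = n →
    ((cs.length : Int) - i).toNat ≤ f →
    (∀ j : Nat, i ≤ (j : Int) → (j : Int) < m → cs[j]? ≠ some '{' ∧ cs[j]? ≠ some '}') →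
    extractAScan cs f i depth = extractAScan cs f m depth := by
  intro n
  induction n with
  | zero =>
      intro i m hi him hm hn _ _
      have : i = m := by omega
      rw [this]
  | succ n ih =>
      intro i m hi him hm hn hf h
      have hlt : i.toNat < cs.length := by omega
      have hch : cs[i.toNat]? = some cs[i.toNat] := List.getElem?_eq_getElem hlt
      have hnb := h i.toNat (by omega) (by omega)
      rw [extractAScanStep cs f i depth cs[i.toNat] hi hch hd hf]
      rw [if_neg (by intro he; exact hnb.1 (he ▸ hch)),
        if_neg (by intro he; exact hnb.2 (he ▸ hch))]
      exact ih (i + 1) m (by omega) (by omega) hm (by omega) (by omega)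
        (fun j hj1 hj2 => h j (by omega) hj2)

-- with no '}' at or after i, A's depth can only grow
theorem extractAScanNoClose (cs : List Char) (f : Nat) :
    ∀ (n : Nat) (i depth : Int), ((cs.length : Int) - i).toNat = n → 0 ≤ i → 0 < depth →
    ((cs.length : Int) - i).toNat ≤ f →
    (∀ j : Nat, i ≤ (j : Int) → cs[j]? ≠ some '}') →
    depth ≤ (extractAScan cs f i depth).2 := by
  intro n
  induction n with
  | zero =>
      intro i depth hn hi hd hf h
      cases f with
      | zero => exact le_refl depth
      | succ f => rw [extractAScan, if_neg (by omega)]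
  | succ n ih =>
      intro i depth hn hi hd hf h
      have hlt : i.toNat < cs.length := by omega
      have hch : cs[i.toNat]? = some cs[i.toNat] := List.getElem?_eq_getElem hlt
      rw [extractAScanStep cs f i depth cs[i.toNat] hi hch hd hf]
      split_ifs with h1 h2
      · have := ih (i + 1) (depth + 1) (by omega) (by omega) (by omega) (by omega)
          (fun j hj => h j (by omega))
        omega
      · exact absurd hch (h2 ▸ h i.toNat (by omega))
      · exact ih (i + 1) depth (by omega) (by omega) hd (by omega)
          (fun j hj => h j (by omega))

-- the main correspondence between the two loops
theorem extractLoopEq (cs : List Char) :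
    ∀ (fB fA : Nat) (i depth : Int), ((cs.length : Int) + 1 - i).toNat ≤ fB →
    ((cs.length : Int) - i).toNat ≤ fA → 0 ≤ i → 0 < depth →
    (∀ c, extractBLoop cs fB i depth = some c → extractAScan cs fA i depth = (c + 1, 0)) ∧
    (extractBLoop cs fB i depth = none → (extractAScan cs fA i depth).2 ≠ 0) := by
  intro fB
  induction fB with
  | zero =>
    intro fA i depth hfB hfA hi hd
    refine ⟨?_, ?_⟩
    · intro c h'; cases h'
    · intro _
      cases fA with
      | zero => simpa [extractAScan] using (by omega : depth ≠ 0)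
      | succ fA =>
          rw [extractAScan, if_neg (by omega)]
          simpa using (by omega : depth ≠ 0)
  | succ fB ih =>
    intro fA i depth hfB hfA hi hd
    by_cases hc : PySem.Chars.findFrom cs ['}'] i none = -1
    · have hbl : extractBLoop cs (fB + 1) i depth = none := by
        rw [extractBLoop]; simp [hc]
      refine ⟨?_, ?_⟩
      · intro c h'; rw [hbl] at h'; cases h'
      · intro _
        have := extractAScanNoClose cs fA ((cs.length : Int) - i).toNat i depth rfl hi hd hfA
          (extractFindNone cs '}' i hi hc)
        omega
    · obtain ⟨p, hpEq, hip, hplt, hpch, hpmin⟩ := extractFindSome cs '}' i hi hc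
      by_cases ho : PySem.Chars.findFrom cs ['{'] i none ≠ -1 ∧
          PySem.Chars.findFrom cs ['{'] i none < PySem.Chars.findFrom cs ['}'] i none
      · obtain ⟨q, hqEq, hiq, hqlt, hqch, hqmin⟩ := extractFindSome cs '{' i hi ho.1
        have hqp : q < p := by rw [hqEq, hpEq] at ho; exact_mod_cast ho.2
        have hbl : extractBLoop cs (fB + 1) i depth =
            extractBLoop cs fB ((q : Int) + 1) (depth + 1) := by
          rw [extractBLoop]; simp only [if_neg hc]; rw [if_pos ho, hqEq]
        have hskip : extractAScan cs fA i depth = extractAScan cs fA (q : Int) depth :=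
          extractAScanSkip cs fA depth hd ((q : Int) - i).toNat i (q : Int) hi (by omega)
            (by omega) rfl hfA
            (fun j hj1 hj2 => ⟨hqmin j hj1 (by omega), hpmin j hj1 (by omega)⟩)
        have hstep := extractAScanStep cs fA (q : Int) depth '{' (by omega)
          (by simpa using hqch) hd (by omega)
        rw [if_pos rfl] at hstep
        have hrec := ih fA ((q : Int) + 1) (depth + 1) (by omega) (by omega) (by omega)
          (by omega)
        refine ⟨?_, ?_⟩
        · intro c h'; rw [hbl] at h'
          rw [hskip, hstep]; exact hrec.1 c h'
        · intro h'; rw [hbl] at h'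
          rw [hskip, hstep]; exact hrec.2 h'
      · have hnotopen : ∀ j : Nat, i ≤ (j : Int) → j < p → cs[j]? ≠ some '{' := by
          by_cases ho1 : PySem.Chars.findFrom cs ['{'] i none = -1
          · intro j hj _; exact extractFindNone cs '{' i hi ho1 j hj
          · obtain ⟨q, hqEq, hiq, hqlt, hqch, hqmin⟩ := extractFindSome cs '{' i hi ho1
            have hpq : p ≤ q := by
              push Not at ho
              have := ho ho1
              rw [hqEq, hpEq] at this
              exact_mod_cast this
            intro j hj hjp
            exact hqmin j hj (by omega)
        have hskip : extractAScan cs fA i depth = extractAScan cs fA (p : Int) depth :=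
          extractAScanSkip cs fA depth hd ((p : Int) - i).toNat i (p : Int) hi (by omega)
            (by omega) rfl hfA
            (fun j hj1 hj2 => ⟨hnotopen j hj1 (by omega), hpmin j hj1 (by omega)⟩)
        have hstep := extractAScanStep cs fA (p : Int) depth '}' (by omega)
          (by simpa using hpch) hd (by omega)
        rw [if_neg (by decide), if_pos rfl] at hstep
        by_cases hz : depth - 1 = 0
        · have hbl : extractBLoop cs (fB + 1) i depth = some (p : Int) := by
            rw [extractBLoop]; simp only [if_neg hc]; rw [if_neg ho, if_pos hz, hpEq]
          refine ⟨?_, ?_⟩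
          · intro c h'; rw [hbl] at h'
            injection h' with h''
            rw [hskip, hstep, (by omega : depth - 1 = 0), extractAScanZero, ← h'']
          · intro h'; rw [hbl] at h'; cases h'
        · have hbl : extractBLoop cs (fB + 1) i depth =
              extractBLoop cs fB ((p : Int) + 1) (depth - 1) := by
            rw [extractBLoop]; simp only [if_neg hc]; rw [if_neg ho, if_neg hz, hpEq]
          have hrec := ih fA ((p : Int) + 1) (depth - 1) (by omega) (by omega) (by omega)
            (by omega)
          refine ⟨?_, ?_⟩
          · intro c h'; rw [hbl] at h'
            rw [hskip, hstep]; exact hrec.1 c h'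
          · intro h'; rw [hbl] at h'
            rw [hskip, hstep]; exact hrec.2 h'

-- ===== VERDICT (by name: the statement is the Claim_ definition above) =====
theorem extract_braced_body_py_spec : Claim_equal_extract_braced_body_py := by
  intro text start _ hpre
  unfold Pre_extract_braced_body_py at hpre
  have hmain := extractLoopEq text.toList (text.toList.length + 1)
    (((text.toList.length : Int) - start).toNat) start 1 (by omega) (by omega) hpre
    (by norm_num)
  unfold Spec_extract_braced_body_py extract_braced_body_py extract_braced_body_py_alt
  cases hb : extractBLoop text.toList (text.toList.length + 1) start 1 with
  | none =>
      have hne := hmain.2 hb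
      rw [if_pos hne]
  | some c =>
      have hA := hmain.1 c hb
      simp only [hA]
      norm_num
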